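-- pv_equiv track=rewrite | github.com/zedaav/aoc2025 | src/aoc2025/day09.py | rectangle_inside
-- ===== SOURCE A (Python) =====
-- def rectangle_inside(p1: tuple[int, int], p2: tuple[int, int], polygon: set[tuple[int, int]]):
--     x1, y1 = p1
--     x2, y2 = p2
--     x_min, x_max = sorted((x1, x2))
--     y_min, y_max = sorted((y1, y2))
--     for x in range(x_min, x_max + 1):
--         if (x, y_min) not in polygon or (x, y_max) not in polygon:
--             return False
--     return all(not ((x_min, y) not in polygon or (x_max, y) not in polygon) for y in range(y_min, y_max + 1))
-- ===== SOURCE B (Python) =====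
-- def rectangle_inside(p1, p2, polygon):
--     x1, y1 = p1
--     x2, y2 = p2
--     x_min, x_max = (x1, x2) if x1 <= x2 else (x2, x1)
--     y_min, y_max = (y1, y2) if y1 <= y2 else (y2, y1)
--     w = x_max - x_min + 1
--     h = y_max - y_min + 1
--     # number of distinct cells on the rectangle's perimeter: full box minus interior
--     perimeter_size = w * h - max(w - 2, 0) * max(h - 2, 0)
--     hits = 0
--     for (x, y) in polygon:
--         if x_min <= x <= x_max and y_min <= y <= y_max and (
--                 x == x_min or x == x_max or y == y_min or y == y_max):
--             hits += 1
--     return hits == perimeter_size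
-- ===== Notes on version B (the rewrite author's own statement) =====
-- stated objective: alternative
-- what changed: Instead of scanning the perimeter cells and testing each for membership in the polygon set (two early-exit loops), B iterates once over the polygon set counting points that satisfy an arithmetic on-the-perimeter predicate and compares that count with the closed-form perimeter cardinality w*h - max(w-2,0)*max(h-2,0).
import Mathlib
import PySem

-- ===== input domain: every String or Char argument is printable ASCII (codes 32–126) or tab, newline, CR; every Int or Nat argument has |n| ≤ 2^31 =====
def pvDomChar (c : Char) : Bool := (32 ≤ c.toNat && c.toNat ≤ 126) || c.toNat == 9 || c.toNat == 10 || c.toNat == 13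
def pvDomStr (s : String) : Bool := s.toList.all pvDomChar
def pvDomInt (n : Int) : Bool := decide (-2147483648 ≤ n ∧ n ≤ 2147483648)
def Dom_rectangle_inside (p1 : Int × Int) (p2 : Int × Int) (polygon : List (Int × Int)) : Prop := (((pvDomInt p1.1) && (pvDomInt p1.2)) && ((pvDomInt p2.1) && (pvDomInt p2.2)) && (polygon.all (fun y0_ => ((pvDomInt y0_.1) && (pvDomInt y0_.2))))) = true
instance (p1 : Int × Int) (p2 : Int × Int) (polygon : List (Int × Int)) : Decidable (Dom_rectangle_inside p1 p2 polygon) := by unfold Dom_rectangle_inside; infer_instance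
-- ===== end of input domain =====

-- B inverts the traversal: instead of scanning the perimeter cells and looking each
-- up in the polygon set, it counts the polygon points lying on the perimeter and
-- compares the count with the closed-form perimeter cardinality (objective: alternative).

-- ===== PORT A =====
-- A's trailing 'all(not ((x_min, y) not in polygon or (x_max, y) not in polygon) for y in range(...))'
-- ported lazily over the range counter, short-circuiting exactly as Python's all() over a generator
def rectangleColAll (polygon : List (Int × Int)) (x_min x_max y_max : Int) (y : Int) : Bool :=
  if y < y_max + 1 then
    if !(!(!polygon.contains (x_min, y) || !polygon.contains (x_max, y))) then false
    else rectangleColAll polygon x_min x_max y_max (y + 1)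
  else true
termination_by (y_max + 1 - y).toNat
decreasing_by omega

-- A's 'for x in range(x_min, x_max + 1)' loop with its early 'return False'
def rectangleRowLoop (polygon : List (Int × Int)) (x_min x_max y_min y_max : Int) (x : Int) : Bool :=
  if x < x_max + 1 then
    if !polygon.contains (x, y_min) || !polygon.contains (x, y_max) then false
    else rectangleRowLoop polygon x_min x_max y_min y_max (x + 1)
  else rectangleColAll polygon x_min x_max y_max y_min
termination_by (x_max + 1 - x).toNat
decreasing_by omega

def rectangle_inside (p1 : Int × Int) (p2 : Int × Int) (polygon : List (Int × Int)) : Bool :=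
  let x1 := p1.1; let y1 := p1.2
  let x2 := p2.1; let y2 := p2.2
  -- x_min, x_max = sorted((x1, x2)) : destructuring the sorted pair = (min, max)
  let x_min := min x1 x2; let x_max := max x1 x2
  let y_min := min y1 y2; let y_max := max y1 y2
  rectangleRowLoop polygon x_min x_max y_min y_max x_min

-- ===== PORT B =====
-- the arithmetic 'on the perimeter' test of Source B's loop body
def onPerimeter (x_min x_max y_min y_max : Int) (q : Int × Int) : Bool :=
  decide (x_min ≤ q.1) && decide (q.1 ≤ x_max) && decide (y_min ≤ q.2) && decide (q.2 ≤ y_max) &&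
  (decide (q.1 = x_min) || decide (q.1 = x_max) || decide (q.2 = y_min) || decide (q.2 = y_max))

def rectangle_inside_alt (p1 : Int × Int) (p2 : Int × Int) (polygon : List (Int × Int)) : Bool :=
  let x_min := if p1.1 ≤ p2.1 then p1.1 else p2.1
  let x_max := if p1.1 ≤ p2.1 then p2.1 else p1.1
  let y_min := if p1.2 ≤ p2.2 then p1.2 else p2.2
  let y_max := if p1.2 ≤ p2.2 then p2.2 else p1.2
  let w := x_max - x_min + 1
  let h := y_max - y_min + 1
  let perimeter_size := w * h - max (w - 2) 0 * max (h - 2) 0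
  let hits : Int := polygon.foldl
    (fun acc q => if onPerimeter x_min x_max y_min y_max q then acc + 1 else acc) 0
  decide (hits = perimeter_size)

-- ===== PRECONDITION & SPEC =====
-- Pre_ states only that the list encoding of the Python set 'polygon' holds distinct
-- elements — true of every actual input of A, since its 'polygon' parameter is a set.
def Pre_rectangle_inside (p1 : Int × Int) (p2 : Int × Int) (polygon : List (Int × Int)) : Prop :=
  polygon.Nodup
instance (p1 : Int × Int) (p2 : Int × Int) (polygon : List (Int × Int)) : Decidable (Pre_rectangle_inside p1 p2 polygon) := by unfold Pre_rectangle_inside; infer_instance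

def pvWitness_rectangle_inside : (Int × Int) × (Int × Int) × (List (Int × Int)) :=
  ((0, 0), (1, 1), [(0, 0), (0, 1), (1, 0), (1, 1)])

def Spec_rectangle_inside (p1 : Int × Int) (p2 : Int × Int) (polygon : List (Int × Int)) (out : Bool) : Prop := out = rectangle_inside_alt p1 p2 polygon
instance (p1 : Int × Int) (p2 : Int × Int) (polygon : List (Int × Int)) (out : Bool) : Decidable (Spec_rectangle_inside p1 p2 polygon out) := by unfold Spec_rectangle_inside; infer_instance

-- ===== CLAIM (what is proved, stated in full; the proofs are below) =====
def Claim_equal_rectangle_inside : Prop := ∀ (p1 : Int × Int) (p2 : Int × Int) (polygon : List (Int × Int)), Dom_rectangle_inside p1 p2 polygon → Pre_rectangle_inside p1 p2 polygon → Spec_rectangle_inside p1 p2 polygon (rectangle_inside p1 p2 polygon)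

-- ===== LEMMAS AND PROOFS =====

-- A-side characterisation ---------------------------------------------------

theorem colAll_true_iff (polygon : List (Int × Int)) (x_min x_max y_max y : Int) :
    rectangleColAll polygon x_min x_max y_max y = true ↔
      ∀ j : Int, y ≤ j → j < y_max + 1 →
        ((x_min, j) ∈ polygon ∧ (x_max, j) ∈ polygon) := by
  fun_induction rectangleColAll polygon x_min x_max y_max y
  case case1 y h hc =>
    simp at hc
    simp only [Bool.false_eq_true, false_iff, not_forall]
    exact ⟨y, le_rfl, h, by tauto⟩
  case case2 y h hc ih =>
    simp [not_or] at hc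
    rw [ih]
    constructor
    · intro h' j hj1 hj2
      rcases eq_or_lt_of_le hj1 with rfl | hlt
      · exact hc
      · exact h' j (by omega) hj2
    · intro h' j hj1 hj2; exact h' j (by omega) hj2
  case case3 y h =>
    simp only [true_iff]
    intro j hj1 hj2; omega

theorem rowLoop_true_iff (polygon : List (Int × Int)) (x_min x_max y_min y_max x : Int) :
    rectangleRowLoop polygon x_min x_max y_min y_max x = true ↔
      ((∀ i : Int, x ≤ i → i < x_max + 1 →
          ((i, y_min) ∈ polygon ∧ (i, y_max) ∈ polygon)) ∧
       (∀ j : Int, y_min ≤ j → j < y_max + 1 →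
          ((x_min, j) ∈ polygon ∧ (x_max, j) ∈ polygon))) := by
  fun_induction rectangleRowLoop polygon x_min x_max y_min y_max x
  case case1 x h hc =>
    simp at hc
    simp only [Bool.false_eq_true, false_iff, not_and_or, not_forall]
    exact Or.inl ⟨x, le_rfl, h, by tauto⟩
  case case2 x h hc ih =>
    simp [not_or] at hc
    rw [ih]
    constructor
    · rintro ⟨h1, h2⟩
      refine ⟨fun i hi1 hi2 => ?_, h2⟩
      rcases eq_or_lt_of_le hi1 with rfl | hlt
      · exact hc
      · exact h1 i (by omega) hi2
    · rintro ⟨h1, h2⟩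
      exact ⟨fun i hi1 hi2 => h1 i (by omega) hi2, h2⟩
  case case3 x h =>
    rw [colAll_true_iff]
    constructor
    · intro h'; exact ⟨fun i hi1 hi2 => by omega, h'⟩
    · exact fun h' => h'.2

-- counting polygon points on the perimeter vs perimeter ⊆ polygon ----------

theorem count_eq_iff_subset (polygon : List (Int × Int)) (hnd : polygon.Nodup)
    (a b c d : Int) (hab : a ≤ b) (hcd : c ≤ d) :
    ((polygon.countP (onPerimeter a b c d) : Int) =
        (b - a + 1) * (d - c + 1) -
          max (b - a + 1 - 2) 0 * max (d - c + 1 - 2) 0) ↔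
      ∀ qx qy : Int, a ≤ qx → qx ≤ b → c ≤ qy → qy ≤ d →
        (qx = a ∨ qx = b ∨ qy = c ∨ qy = d) → (qx, qy) ∈ polygon := by
  classical
  set P : Finset (Int × Int) :=
    (Finset.Icc a b ×ˢ Finset.Icc c d).filter
      (fun q => q.1 = a ∨ q.1 = b ∨ q.2 = c ∨ q.2 = d) with hPdef
  have hmemP : ∀ q : Int × Int, q ∈ P ↔
      (a ≤ q.1 ∧ q.1 ≤ b ∧ c ≤ q.2 ∧ q.2 ≤ d ∧
        (q.1 = a ∨ q.1 = b ∨ q.2 = c ∨ q.2 = d)) := by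
    intro q
    simp only [hPdef, Finset.mem_filter, Finset.mem_product, Finset.mem_Icc]
    tauto
  have hcardP : (P.card : Int) =
      (b - a + 1) * (d - c + 1) -
        max (b - a + 1 - 2) 0 * max (d - c + 1 - 2) 0 := by
    have hP : P =
        (Finset.Icc a b ×ˢ Finset.Icc c d) \ (Finset.Icc (a + 1) (b - 1) ×ˢ Finset.Icc (c + 1) (d - 1)) := by
      ext ⟨x, y⟩
      simp only [hPdef, Finset.mem_filter, Finset.mem_sdiff, Finset.mem_product,
        Finset.mem_Icc]
      omega
    have hsub : (Finset.Icc (a + 1) (b - 1) ×ˢ Finset.Icc (c + 1) (d - 1)) ⊆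
        (Finset.Icc a b ×ˢ Finset.Icc c d) := by
      intro ⟨x, y⟩ h
      simp only [Finset.mem_product, Finset.mem_Icc] at h ⊢
      omega
    rw [hP, Finset.card_sdiff, Finset.inter_eq_left.mpr hsub,
      Finset.card_product, Finset.card_product,
      Int.card_Icc, Int.card_Icc, Int.card_Icc, Int.card_Icc]
    have hle : (b - 1 + 1 - (a + 1)).toNat * (d - 1 + 1 - (c + 1)).toNat ≤
        (b + 1 - a).toNat * (d + 1 - c).toNat :=
      Nat.mul_le_mul (by omega) (by omega)
    rw [Nat.cast_sub hle, Nat.cast_mul, Nat.cast_mul]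
    have h1 : ((b + 1 - a).toNat : Int) = b - a + 1 := by omega
    have h2 : ((d + 1 - c).toNat : Int) = d - c + 1 := by omega
    have h3 : ((b - 1 + 1 - (a + 1)).toNat : Int) = max (b - a + 1 - 2) 0 := by omega
    have h4 : ((d - 1 + 1 - (c + 1)).toNat : Int) = max (d - c + 1 - 2) 0 := by omega
    rw [h1, h2, h3, h4]
  have hfilter : polygon.toFinset.filter (fun q => onPerimeter a b c d q = true) =
      polygon.toFinset ∩ P := by
    ext q
    simp only [Finset.mem_filter, Finset.mem_inter, hmemP, onPerimeter,
      Bool.and_eq_true, Bool.or_eq_true, decide_eq_true_eq]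
    tauto
  have hcount : polygon.countP (onPerimeter a b c d) =
      (polygon.toFinset ∩ P).card := by
    rw [← hfilter, ← List.toFinset_filter,
      List.toFinset_card_of_nodup (hnd.filter _), List.countP_eq_length_filter]
  rw [hcount, ← hcardP, Int.natCast_inj]
  constructor
  · intro h qx qy h1 h2 h3 h4 h5
    have heq : polygon.toFinset ∩ P = P :=
      Finset.eq_of_subset_of_card_le Finset.inter_subset_right (le_of_eq h.symm)
    have hqP : ((qx, qy) : Int × Int) ∈ P := by rw [hmemP]; exact ⟨h1, h2, h3, h4, h5⟩
    have : ((qx, qy) : Int × Int) ∈ polygon.toFinset ∩ P := by rw [heq]; exact hqP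
    exact List.mem_toFinset.mp (Finset.mem_inter.mp this).1
  · intro h
    have hsubS : P ⊆ polygon.toFinset := by
      intro q hq
      rw [hmemP] at hq
      obtain ⟨h1, h2, h3, h4, h5⟩ := hq
      rw [List.mem_toFinset]
      have := h q.1 q.2 h1 h2 h3 h4 h5
      simpa using this
    rw [Finset.inter_eq_right.mpr hsubS]

-- ===== VERDICT (by name: the statement is the Claim_ definition above) =====
theorem rectangle_inside_spec : Claim_equal_rectangle_inside := by
  intro p1 p2 polygon _ hnd
  unfold Spec_rectangle_inside rectangle_inside rectangle_inside_alt
  have hx : (if p1.1 ≤ p2.1 then p1.1 else p2.1) = min p1.1 p2.1 := (min_def p1.1 p2.1).symm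
  have hX : (if p1.1 ≤ p2.1 then p2.1 else p1.1) = max p1.1 p2.1 := (max_def p1.1 p2.1).symm
  have hy : (if p1.2 ≤ p2.2 then p1.2 else p2.2) = min p1.2 p2.2 := (min_def p1.2 p2.2).symm
  have hY : (if p1.2 ≤ p2.2 then p2.2 else p1.2) = max p1.2 p2.2 := (max_def p1.2 p2.2).symm
  simp only [hx, hX, hy, hY]
  set a := min p1.1 p2.1
  set b := max p1.1 p2.1
  set c := min p1.2 p2.2
  set d := max p1.2 p2.2
  have hab : a ≤ b := min_le_max
  have hcd : c ≤ d := min_le_max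
  rw [PySem.List.foldl_count_if (onPerimeter a b c d) polygon 0]
  rw [Bool.eq_iff_iff, decide_eq_true_eq, zero_add]
  rw [rowLoop_true_iff]
  rw [count_eq_iff_subset polygon hnd a b c d hab hcd]
  constructor
  · rintro ⟨h1, h2⟩ qx qy hq1 hq2 hq3 hq4 hq5
    rcases hq5 with rfl | rfl | rfl | rfl
    · exact (h2 qy hq3 (by omega)).1
    · exact (h2 qy hq3 (by omega)).2
    · exact (h1 qx hq1 (by omega)).1
    · exact (h1 qx hq1 (by omega)).2
  · intro h
    constructor
    · intro i hi1 hi2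
      exact ⟨h i c hi1 (by omega) le_rfl hcd (by tauto),
             h i d hi1 (by omega) hcd le_rfl (by tauto)⟩
    · intro j hj1 hj2
      exact ⟨h a j le_rfl hab hj1 (by omega) (by tauto),
             h b j hab le_rfl hj1 (by omega) (by tauto)⟩
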